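-- pv_equiv track=rewrite | github.com/Jerry2003826/nivida | src/teacher/atomic_ops.py | _most_common_decimal_places
-- ===== SOURCE A (Python) =====
-- from typing import Any, Iterable
--
-- def _decimal_places(text: str) -> int:
--     stripped = text.strip()
--     if "." not in stripped:
--         return 0
--     return len(stripped.rsplit(".", 1)[1])
--
-- def _most_common_decimal_places(texts: Iterable[str], default: int = 2) -> int:
--     counts: dict[int, int] = {}
--     for text in texts:
--         places = _decimal_places(text)
--         counts[places] = counts.get(places, 0) + 1
--     if not counts:
--         return default
--     return sorted(counts.items(), key=lambda item: (-item[1], item[0]))[0][0]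
-- ===== SOURCE B (Python) =====
-- def _decimal_places(text: str) -> int:
--     stripped = text.strip()
--     if "." not in stripped:
--         return 0
--     return len(stripped.rsplit(".", 1)[1])
--
--
-- def _most_common_decimal_places(texts, default: int = 2) -> int:
--     places = sorted(_decimal_places(text) for text in texts)
--     if not places:
--         return default
--     best_val, best_len = places[0], 0
--     cur_val, cur_len = places[0], 0
--     for p in places:
--         if p == cur_val:
--             cur_len += 1
--         else:
--             cur_val, cur_len = p, 1
--         if cur_len > best_len:
--             best_val, best_len = cur_val, cur_len
--     return best_val
-- ===== Notes on version B (the rewrite author's own statement) =====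
-- stated objective: alternative
-- what changed: Drops the counting dict entirely: B sorts the per-string decimal-place counts and finds the longest run in one scan of the sorted list (strict '>' keeps the first, i.e. smallest, value on ties), instead of A's hash-count plus sort of (count, value) items.
import Mathlib
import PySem

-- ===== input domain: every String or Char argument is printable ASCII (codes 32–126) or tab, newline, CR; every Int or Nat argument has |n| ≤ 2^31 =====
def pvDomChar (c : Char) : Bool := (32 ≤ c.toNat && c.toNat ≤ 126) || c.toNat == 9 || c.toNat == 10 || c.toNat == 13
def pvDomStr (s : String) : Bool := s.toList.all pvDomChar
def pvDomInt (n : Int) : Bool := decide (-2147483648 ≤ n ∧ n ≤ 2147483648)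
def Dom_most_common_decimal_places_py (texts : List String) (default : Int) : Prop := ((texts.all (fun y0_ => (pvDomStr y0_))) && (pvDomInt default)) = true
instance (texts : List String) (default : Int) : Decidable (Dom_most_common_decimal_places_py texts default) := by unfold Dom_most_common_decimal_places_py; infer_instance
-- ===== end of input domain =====

-- B drops A's counting dict: it sorts the per-string decimal-place counts and finds the
-- longest run in one scan of the sorted list (strict '>' keeps the smallest value on ties) —
-- an alternative algorithm of similar cost.

-- ===== PORT A =====
-- shared module helper _decimal_places (Source B reuses it verbatim);
-- 'stripped.rsplit(".", 1)[1]' is ported by hand (no rsplit-with-maxsplit in PySem) as the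
-- segment after the LAST '.', exact because the branch runs only when '.' occurs in stripped.
def pyDecimalPlaces (text : String) : Int :=
  let stripped := (PySem.Str.strip text).toList
  if PySem.Chars.isIn ['.'] stripped then
    ((PySem.Chars.slice stripped (some (PySem.Chars.rfind stripped ['.'] + 1)) none).length : Int)
  else 0

def most_common_decimal_places_py (texts : List String) (default : Int) : Int :=
  let counts := texts.foldl (fun d text =>
      let places := pyDecimalPlaces text
      d.insert places (d.getD places 0 + 1)) (PySem.Dict.empty : PySem.Dict Int Int)
  if counts.items.isEmpty then default
  else
    match PySem.List.sorted2 counts.items (fun it => -it.2) (fun it => it.1) with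
    | [] => default  -- unreachable totality guard for the [0] indexing
    | it :: _ => it.1

-- ===== PORT B =====
-- the loop body of B's for-loop, named (state = (best_val, best_len, cur_val, cur_len))
def pvBStep (st : Int × Int × Int × Int) (p : Int) : Int × Int × Int × Int :=
  let cv' := if p = st.2.2.1 then st.2.2.1 else p
  let cl' := if p = st.2.2.1 then st.2.2.2 + 1 else 1
  if cl' > st.2.1 then (cv', cl', cv', cl') else (st.1, st.2.1, cv', cl')

def most_common_decimal_places_py_alt (texts : List String) (default : Int) : Int :=
  let places := PySem.List.sorted (texts.map (fun text => pyDecimalPlaces text)) (fun x => x) false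
  match places with
  | [] => default
  | p0 :: _ => (places.foldl pvBStep (p0, 0, p0, 0)).1

-- ===== PRECONDITION & SPEC =====
def Spec_most_common_decimal_places_py (texts : List String) (default : Int) (out : Int) : Prop := out = most_common_decimal_places_py_alt texts default
instance (texts : List String) (default : Int) (out : Int) : Decidable (Spec_most_common_decimal_places_py texts default out) := by unfold Spec_most_common_decimal_places_py; infer_instance

-- ===== CLAIM =====
def Claim_equal_most_common_decimal_places_py : Prop := ∀ (texts : List String) (default : Int), Dom_most_common_decimal_places_py texts default → Spec_most_common_decimal_places_py texts default (most_common_decimal_places_py texts default)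

-- ===== LEMMAS AND PROOFS =====

-- "v is the most common value of ps, smallest on ties" — both programs compute this
def pvValBest (ps : List Int) (v : Int) : Prop :=
  v ∈ ps ∧ ∀ u ∈ ps, ((ps.count u : Int) < (ps.count v : Int) ∨ ((ps.count u : Int) = (ps.count v : Int) ∧ v ≤ u))

lemma pvValBest_unique {ps : List Int} {v w : Int} (hv : pvValBest ps v) (hw : pvValBest ps w) : v = w := by
  rcases hv with ⟨hvm, hvmax⟩
  rcases hw with ⟨hwm, hwmax⟩
  rcases hvmax w hwm with h1 | h1 <;> rcases hwmax v hvm with h2 | h2 <;> omega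

lemma pvValBest_perm {xs ys : List Int} {v : Int} (h : xs.Perm ys) (hv : pvValBest xs v) : pvValBest ys v := by
  rcases hv with ⟨hm, hmax⟩
  refine ⟨h.mem_iff.mp hm, fun u hu => ?_⟩
  rw [← h.count_eq u, ← h.count_eq v]
  exact hmax u (h.mem_iff.mpr hu)

-- A-side: the selection step hidden in A's sort-then-[0] (max count, ties to smaller value)
def pvStep (best : Option (Int × Int)) (x : Int × Int) : Option (Int × Int) :=
  match best with
  | none => some x
  | some b => if x.2 > b.2 ∨ (x.2 = b.2 ∧ x.1 < b.1) then some x else some b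

-- the head of Python's stable lex sort (key = (-count, value)) is the pvStep-maximum
lemma head?_sorted2 (L : List (Int × Int)) :
    (PySem.List.sorted2 L (fun it => -it.2) (fun it => it.1)).head? = L.foldl pvStep none := by
  induction L using List.reverseRecOn with
  | nil => simp [PySem.List.sorted2]
  | append_singleton L x ih =>
    have hs : PySem.List.sorted2 (L ++ [x]) (fun it : Int × Int => -it.2) (fun it => it.1) =
        PySem.List.insertBy
          (fun a b => decide (-a.2 < -b.2) || (!decide (-b.2 < -a.2) && decide (a.1 < b.1))) x
          (PySem.List.sorted2 L (fun it => -it.2) (fun it => it.1)) := by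
      simp [PySem.List.sorted2, List.foldl_append]
    rw [hs, List.foldl_append, List.foldl_cons, List.foldl_nil]
    cases hL : PySem.List.sorted2 L (fun it : Int × Int => -it.2) (fun it => it.1) with
    | nil =>
      have : L.foldl pvStep none = none := by rw [← ih, hL]; rfl
      simp [PySem.List.insertBy, this, pvStep]
    | cons y ys =>
      have hy : L.foldl pvStep none = some y := by rw [← ih, hL]; rfl
      rw [hy]
      simp only [PySem.List.insertBy, pvStep]
      split_ifs with h1 h2 h3 <;>
        simp only [decide_eq_true_eq, Bool.or_eq_true, Bool.and_eq_true, decide_eq_false_iff_not, Bool.not_eq_eq_eq_not, Bool.not_true, List.head?_cons,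
          Option.some.injEq] at * <;>
        first | rfl | (exfalso; omega)

-- folding pvStep from 'some b' yields the maximum of b :: L under (count desc, value asc)
lemma pvFoldl_pvStep_max (L : List (Int × Int)) : ∀ b : Int × Int,
    ∃ c, L.foldl pvStep (some b) = some c ∧ c ∈ b :: L ∧
      ∀ x ∈ b :: L, (x.2 < c.2 ∨ (x.2 = c.2 ∧ c.1 ≤ x.1)) := by
  induction L with
  | nil =>
    intro b
    exact ⟨b, rfl, by simp, by intro x hx; simp at hx; subst hx; right; exact ⟨rfl, le_refl _⟩⟩
  | cons y ys ih =>
    intro b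
    by_cases h : y.2 > b.2 ∨ (y.2 = b.2 ∧ y.1 < b.1)
    · obtain ⟨c, hc, hmem, hmax⟩ := ih y
      refine ⟨c, by simpa [pvStep, h] using hc, ?_, ?_⟩
      · rcases List.mem_cons.mp hmem with h' | h' <;> simp [h']
      · intro x hx
        have hyc := hmax y (by simp)
        simp only [List.mem_cons] at hx
        rcases hx with rfl | rfl | hx
        · omega
        · omega
        · exact hmax x (by simp [hx])
    · obtain ⟨c, hc, hmem, hmax⟩ := ih b
      refine ⟨c, by simpa [pvStep, h] using hc, ?_, ?_⟩
      · rcases List.mem_cons.mp hmem with h' | h' <;> simp [h']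
      · intro x hx
        have hbc := hmax b (by simp)
        simp only [List.mem_cons] at hx
        simp only [not_or, not_lt, not_and] at h
        rcases hx with rfl | rfl | hx
        · omega
        · rcases hbc with h' | h' <;> [left; skip] <;> omega
        · exact hmax x (by simp [hx])

-- A's head element is (v, count v) for the best value v
lemma pvA_head (ps : List Int) (hne : ps ≠ []) :
    ∃ v, (PySem.List.sorted2 ((PySem.Set.ofList ps).map (fun k => (k, (ps.count k : Int))))
        (fun it => -it.2) (fun it => it.1)).head? = some (v, (ps.count v : Int)) ∧ pvValBest ps v := by
  cases hS : PySem.Set.ofList ps with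
  | nil =>
    exfalso
    cases ps with
    | nil => exact hne rfl
    | cons a as =>
      have : a ∈ PySem.Set.ofList (a :: as) := (PySem.Set.mem_ofList _ _).mpr (by simp)
      rw [hS] at this; simp at this
  | cons k0 ks =>
    rw [head?_sorted2]
    have hmap : ((k0 :: ks).map (fun k => (k, (ps.count k : Int)))) =
        (k0, (ps.count k0 : Int)) :: ks.map (fun k => (k, (ps.count k : Int))) := by simp
    rw [hmap, List.foldl_cons]
    have hstep : pvStep none (k0, (ps.count k0 : Int)) = some (k0, (ps.count k0 : Int)) := rfl
    rw [hstep]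
    obtain ⟨c, hc, hmem, hmax⟩ := pvFoldl_pvStep_max (ks.map (fun k => (k, (ps.count k : Int)))) (k0, (ps.count k0 : Int))
    rw [← hmap] at hmem hmax
    have hcform : ∃ v ∈ PySem.Set.ofList ps, c = (v, (ps.count v : Int)) := by
      rw [hS]
      simp only [List.mem_map] at hmem
      obtain ⟨v, hv, hvc⟩ := hmem
      exact ⟨v, hv, hvc.symm⟩
    obtain ⟨v, hvS, rfl⟩ := hcform
    refine ⟨v, hc, (PySem.Set.mem_ofList _ _).mp hvS, fun u hu => ?_⟩
    have hu' : (u, (ps.count u : Int)) ∈ (k0 :: ks).map (fun k => (k, (ps.count k : Int))) := by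
      rw [← hS]
      exact List.mem_map.mpr ⟨u, (PySem.Set.mem_ofList _ _).mpr hu, rfl⟩
    simpa using hmax _ hu'

-- B-side: the run-length scan over the tail of a sorted list preserves its invariant
lemma pvB_run (rest : List Int) : ∀ (pre : List Int) (bv bl cv cl : Int),
    (∀ a ∈ pre, ∀ b ∈ rest, a ≤ b) →
    rest.Pairwise (· ≤ ·) →
    cv ∈ pre →
    (∀ a ∈ pre, a ≤ cv) →
    cl = (pre.count cv : Int) →
    bv ∈ pre →
    bl = (pre.count bv : Int) →
    (∀ u ∈ pre, ((pre.count u : Int) < bl ∨ ((pre.count u : Int) = bl ∧ bv ≤ u))) →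
    pvValBest (pre ++ rest) (rest.foldl pvBStep (bv, bl, cv, cl)).1 := by
  induction rest with
  | nil =>
    intro pre bv bl cv cl _ _ _ _ _ hbv hbl hmax
    subst hbl
    simp only [List.foldl_nil, List.append_nil]
    exact ⟨hbv, hmax⟩
  | cons p rest' ih =>
    intro pre bv bl cv cl hcross hpw hcv hcvmax hcl hbv hbl hmax
    have hcvp : cv ≤ p := hcross cv hcv p (by simp)
    have hpw' : rest'.Pairwise (· ≤ ·) := hpw.tail
    have hple : ∀ b ∈ rest', p ≤ b := fun b hb => List.rel_of_pairwise_cons hpw hb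
    have hcross' : ∀ a ∈ pre ++ [p], ∀ b ∈ rest', a ≤ b := by
      intro a ha b hb
      rcases List.mem_append.mp ha with ha' | ha'
      · exact hcross a ha' b (by simp [hb])
      · simp at ha'; subst ha'; exact hple b hb
    have hbl1 : 1 ≤ bl := by
      have := List.count_pos_iff.mpr hbv
      omega
    have hassoc : pre ++ p :: rest' = (pre ++ [p]) ++ rest' := by simp
    rw [List.foldl_cons]
    by_cases hp : p = cv
    · -- run continues
      have hcnt : ((pre ++ [p]).count cv : Int) = cl + 1 := by
        subst hp
        simp only [List.count_append, List.count_cons_self, List.count_nil]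
        omega
      have hcntu : ∀ u : Int, u ≠ cv → (pre ++ [p]).count u = pre.count u := by
        intro u hu; subst hp; simp [List.count_append, Ne.symm hu]
      have hstep : pvBStep (bv, bl, cv, cl) p =
          if cl + 1 > bl then (cv, cl + 1, cv, cl + 1) else (bv, bl, cv, cl + 1) := by
        simp [pvBStep, hp]
      rw [hstep]
      by_cases hgt : cl + 1 > bl
      · rw [if_pos hgt, hassoc]
        refine ih (pre ++ [p]) cv (cl + 1) cv (cl + 1) hcross' hpw' (by simp [hp]) ?_ (by omega) (by simp [hp]) (by omega) ?_
        · intro a ha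
          rcases List.mem_append.mp ha with ha' | ha'
          · exact hcvmax a ha'
          · simp at ha'; subst ha'; omega
        · intro u hu
          by_cases huc : u = cv
          · rw [huc]; right; exact ⟨by omega, le_refl _⟩
          · left
            rw [hcntu u huc]
            have humem : u ∈ pre := by
              rcases List.mem_append.mp hu with h | h
              · exact h
              · exact absurd ((List.mem_singleton.mp h).trans hp) huc
            rcases hmax u humem with h | h <;> omega
      · rw [if_neg hgt, hassoc]
        have hbvcv : bv ≠ cv := by
          intro h; rw [h] at hbl; omega
        refine ih (pre ++ [p]) bv bl cv (cl + 1) hcross' hpw' (by simp [hp]) ?_ (by omega) (by simp [hbv]) ?_ ?_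
        · intro a ha
          rcases List.mem_append.mp ha with ha' | ha'
          · exact hcvmax a ha'
          · simp at ha'; subst ha'; omega
        · rw [hcntu bv hbvcv]; exact hbl
        · intro u hu
          by_cases huc : u = cv
          · rw [huc]
            have hbvle : bv ≤ cv := hcvmax bv hbv
            rcases (by omega : cl + 1 < bl ∨ cl + 1 = bl) with h | h
            · left; omega
            · right; exact ⟨by omega, hbvle⟩
          · rw [hcntu u huc]
            refine hmax u ?_
            rcases List.mem_append.mp hu with h | h
            · exact h
            · exact absurd ((List.mem_singleton.mp h).trans hp) huc
    · -- new run of length 1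
      have hplt : cv < p := lt_of_le_of_ne hcvp (fun h => hp h.symm)
      have hnp : p ∉ pre := fun h => absurd (hcvmax p h) (by omega)
      have hcntu : ∀ u : Int, u ≠ p → (pre ++ [p]).count u = pre.count u := by
        intro u hu; simp [List.count_append, Ne.symm hu]
      have hcntp : ((pre ++ [p]).count p : Int) = 1 := by
        simp [List.count_append, List.count_eq_zero_of_not_mem hnp]
      have hstep : pvBStep (bv, bl, cv, cl) p =
          if (1 : Int) > bl then (p, 1, p, 1) else (bv, bl, p, 1) := by
        simp [pvBStep, hp]
      rw [hstep, if_neg (by omega), hassoc]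
      have hbvp : bv ≠ p := fun h => hnp (h ▸ hbv)
      refine ih (pre ++ [p]) bv bl p 1 hcross' hpw' (by simp) ?_ (by omega) (by simp [hbv]) ?_ ?_
      · intro a ha
        rcases List.mem_append.mp ha with ha' | ha'
        · have := hcvmax a ha'; omega
        · simp at ha'; omega
      · rw [hcntu bv hbvp]; exact hbl
      · intro u hu
        by_cases hup : u = p
        · rw [hup]
          rcases (by omega : (1 : Int) < bl ∨ 1 = bl) with h | h
          · left; omega
          · right
            refine ⟨by omega, ?_⟩
            have := hcvmax bv hbv
            omega
        · rw [hcntu u hup]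
          refine hmax u ?_
          rcases List.mem_append.mp hu with h | h
          · exact h
          · exact absurd (List.mem_singleton.mp h) hup

-- the first element of B's sorted list starts a run of length 1 after the first loop step
lemma pvBStep_first (q0 : Int) : pvBStep (q0, 0, q0, 0) q0 = (q0, 1, q0, 1) := by
  norm_num [pvBStep]

lemma pvOfList_ne_nil {ps : List Int} (hne : ps ≠ []) : PySem.Set.ofList ps ≠ [] := by
  cases ps with
  | nil => exact absurd rfl hne
  | cons a as =>
    intro h
    have : a ∈ PySem.Set.ofList (a :: as) := (PySem.Set.mem_ofList _ _).mpr (by simp)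
    rw [h] at this
    simp at this

-- B's whole scan of the sorted list computes the best value
lemma pvB_best (ps : List Int) (q0 : Int) (qrest : List Int)
    (hqs : PySem.List.sorted ps (fun x => x) false = q0 :: qrest) :
    pvValBest ps ((q0 :: qrest).foldl pvBStep (q0, 0, q0, 0)).1 := by
  have hpw : (q0 :: qrest).Pairwise (fun a b : Int => a ≤ b) := by
    have := PySem.List.sorted_pairwise ps (fun x : Int => x)
    rwa [hqs] at this
  have hperm : (q0 :: qrest).Perm ps := by
    have := PySem.List.sorted_perm ps (fun x : Int => x) false
    rwa [hqs] at this
  rw [List.foldl_cons, pvBStep_first]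
  have hrun := pvB_run qrest [q0] q0 1 q0 1
    (by intro a ha b hb
        simp at ha; subst ha
        exact List.rel_of_pairwise_cons hpw hb)
    hpw.tail
    (by simp) (by intro a ha; simp at ha; omega) (by simp) (by simp) (by simp)
    (by intro u hu; simp at hu; subst hu; right; exact ⟨by simp, le_refl _⟩)
  have : ([q0] ++ qrest) = q0 :: qrest := by simp
  rw [this] at hrun
  exact pvValBest_perm hperm hrun

-- ===== VERDICT =====
theorem most_common_decimal_places_py_spec : Claim_equal_most_common_decimal_places_py := by
  intro texts default _
  unfold Spec_most_common_decimal_places_py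
  unfold most_common_decimal_places_py most_common_decimal_places_py_alt
  simp only []
  set ps := texts.map (fun text => pyDecimalPlaces text) with hps
  have hcounts : texts.foldl (fun d text =>
      let places := pyDecimalPlaces text
      d.insert places (d.getD places 0 + 1)) (PySem.Dict.empty : PySem.Dict Int Int)
      = PySem.Dict.counter ps := by
    rw [← PySem.Dict.foldl_insert_getD_add_one_eq_counter, hps, List.foldl_map]
  rw [hcounts, PySem.Dict.items_counter]
  cases htx : texts with
  | nil =>
    have hps0 : ps = [] := by rw [hps, htx]; rfl
    rw [hps0]
    rfl
  | cons t ts =>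
    have hne : ps ≠ [] := by rw [hps, htx]; simp
    have hSne : PySem.Set.ofList ps ≠ [] := pvOfList_ne_nil hne
    have hEmp : ((PySem.Set.ofList ps).map (fun k => (k, (ps.count k : Int)))).isEmpty = false := by
      cases hS : PySem.Set.ofList ps with
      | nil => exact absurd hS hSne
      | cons k0 ks => simp
    rw [hEmp]
    simp only [Bool.false_eq_true, if_false]
    obtain ⟨va, hhead, hbesta⟩ := pvA_head ps hne
    have hqne : PySem.List.sorted ps (fun x : Int => x) false ≠ [] := by
      intro h
      exact hne ((PySem.List.sorted_eq_nil_iff ps (fun x : Int => x) false).mp h)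
    cases hqs : PySem.List.sorted ps (fun x : Int => x) false with
    | nil => exact absurd hqs hqne
    | cons q0 qrest =>
      have hbestb := pvB_best ps q0 qrest hqs
      cases hsrt : PySem.List.sorted2 ((PySem.Set.ofList ps).map (fun k => (k, (ps.count k : Int))))
          (fun it => -it.2) (fun it => it.1) with
      | nil => rw [hsrt] at hhead; simp at hhead
      | cons it rest =>
        rw [hsrt] at hhead
        simp only [List.head?_cons, Option.some.injEq] at hhead
        show it.1 = (List.foldl pvBStep (q0, 0, q0, 0) (q0 :: qrest)).1
        rw [hhead]
        exact pvValBest_unique hbesta hbestb
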